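-- pv_equiv track=rewrite | github.com/evphoriz/solar_array_prediction | GRU.py | estimate_flops_gru
-- ===== SOURCE A (Python) =====
-- def estimate_flops_gru(
--     seq_len: int,
--     input_dim: int,
--     hidden_dim: int,
--     num_layers: int,
--     output_dim: int,
--     bidirectional: bool = False,
--     include_elementwise: bool = False,
-- ) -> int:
--
--     dirs = 2 if bidirectional else 1
--     total_flops = 0
--     in_dim = input_dim
--
--     for layer in range(num_layers):
--
--         flops_per_step_per_dir = 2 * 3 * (in_dim * hidden_dim + hidden_dim * hidden_dim)
--         if include_elementwise:
--             flops_per_step_per_dir += 10 * hidden_dim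
--
--
--         layer_flops = seq_len * dirs * flops_per_step_per_dir
--         total_flops += layer_flops
--
--         in_dim = hidden_dim * dirs
--
--     d_in = hidden_dim * dirs
--     fc_flops = 2 * d_in * output_dim
--     total_flops += fc_flops
--
--     return int(total_flops)
-- ===== SOURCE B (Python) =====
-- def estimate_flops_gru(
--     seq_len: int,
--     input_dim: int,
--     hidden_dim: int,
--     num_layers: int,
--     output_dim: int,
--     bidirectional: bool = False,
--     include_elementwise: bool = False,
-- ) -> int:
--     dirs = 2 if bidirectional else 1
--     total = 0
--     if num_layers >= 1:
--         first = 6 * (input_dim * hidden_dim + hidden_dim * hidden_dim)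
--         rest = 6 * ((hidden_dim * dirs) * hidden_dim + hidden_dim * hidden_dim)
--         total = seq_len * dirs * (first + (num_layers - 1) * rest)
--         if include_elementwise:
--             total += seq_len * dirs * 10 * hidden_dim * num_layers
--     return total + 2 * (hidden_dim * dirs) * output_dim
-- ===== Notes on version B (the rewrite author's own statement) =====
-- stated objective: faster
-- what changed: Replaced the per-layer accumulation loop with a closed-form expression: first-layer cost plus (num_layers-1) copies of the repeated-layer cost, plus the elementwise and FC terms.
import Mathlib
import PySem

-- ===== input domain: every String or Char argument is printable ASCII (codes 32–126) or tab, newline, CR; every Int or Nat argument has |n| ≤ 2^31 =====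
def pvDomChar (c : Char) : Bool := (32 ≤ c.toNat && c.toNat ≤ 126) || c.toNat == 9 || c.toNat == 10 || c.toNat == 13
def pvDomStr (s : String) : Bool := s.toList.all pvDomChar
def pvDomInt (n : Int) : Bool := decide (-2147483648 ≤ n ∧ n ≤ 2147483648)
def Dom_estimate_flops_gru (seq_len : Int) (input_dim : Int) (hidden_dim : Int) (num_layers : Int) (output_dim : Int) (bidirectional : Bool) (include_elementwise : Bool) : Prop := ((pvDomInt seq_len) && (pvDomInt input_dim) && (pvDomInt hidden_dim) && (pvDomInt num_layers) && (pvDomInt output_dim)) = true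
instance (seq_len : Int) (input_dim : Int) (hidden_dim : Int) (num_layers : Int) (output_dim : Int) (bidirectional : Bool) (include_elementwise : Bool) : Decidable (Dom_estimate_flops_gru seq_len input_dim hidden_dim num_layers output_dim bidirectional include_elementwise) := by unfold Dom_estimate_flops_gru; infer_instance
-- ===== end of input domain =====

-- B replaces A's per-layer accumulation loop with a closed-form expression (simpler; same result).

-- ===== PORT A =====
-- literal transliteration of A: a fold over range(num_layers) carrying (total_flops, in_dim)
def estimate_flops_gru (seq_len : Int) (input_dim : Int) (hidden_dim : Int) (num_layers : Int) (output_dim : Int) (bidirectional : Bool) (include_elementwise : Bool) : Int :=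
  let dirs : Int := if bidirectional then 2 else 1
  let st : Int × Int :=
    (PySem.List.pyRange 0 num_layers 1).foldl
      (fun (s : Int × Int) _layer =>
        let flops_per_step_per_dir := 2 * 3 * (s.2 * hidden_dim + hidden_dim * hidden_dim)
        let flops_per_step_per_dir :=
          if include_elementwise then flops_per_step_per_dir + 10 * hidden_dim
          else flops_per_step_per_dir
        let layer_flops := seq_len * dirs * flops_per_step_per_dir
        (s.1 + layer_flops, hidden_dim * dirs))
      (0, input_dim)
  let d_in := hidden_dim * dirs
  let fc_flops := 2 * d_in * output_dim
  st.1 + fc_flops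

-- ===== PORT B =====
def estimate_flops_gru_alt (seq_len : Int) (input_dim : Int) (hidden_dim : Int) (num_layers : Int) (output_dim : Int) (bidirectional : Bool) (include_elementwise : Bool) : Int :=
  let dirs : Int := if bidirectional then 2 else 1
  let total : Int :=
    if num_layers ≥ 1 then
      let first := 6 * (input_dim * hidden_dim + hidden_dim * hidden_dim)
      let rest := 6 * ((hidden_dim * dirs) * hidden_dim + hidden_dim * hidden_dim)
      let base := seq_len * dirs * (first + (num_layers - 1) * rest)
      if include_elementwise then base + seq_len * dirs * 10 * hidden_dim * num_layers
      else base
    else 0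
  total + 2 * (hidden_dim * dirs) * output_dim

-- ===== PRECONDITION & SPEC =====
def Spec_estimate_flops_gru (seq_len : Int) (input_dim : Int) (hidden_dim : Int) (num_layers : Int) (output_dim : Int) (bidirectional : Bool) (include_elementwise : Bool) (out : Int) : Prop := out = estimate_flops_gru_alt seq_len input_dim hidden_dim num_layers output_dim bidirectional include_elementwise
instance (seq_len : Int) (input_dim : Int) (hidden_dim : Int) (num_layers : Int) (output_dim : Int) (bidirectional : Bool) (include_elementwise : Bool) (out : Int) : Decidable (Spec_estimate_flops_gru seq_len input_dim hidden_dim num_layers output_dim bidirectional include_elementwise out) := by unfold Spec_estimate_flops_gru; infer_instance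

-- ===== CLAIM (what is proved, stated in full; the proofs are below) =====
def Claim_equal_estimate_flops_gru : Prop := ∀ (seq_len : Int) (input_dim : Int) (hidden_dim : Int) (num_layers : Int) (output_dim : Int) (bidirectional : Bool) (include_elementwise : Bool), Dom_estimate_flops_gru seq_len input_dim hidden_dim num_layers output_dim bidirectional include_elementwise → Spec_estimate_flops_gru seq_len input_dim hidden_dim num_layers output_dim bidirectional include_elementwise (estimate_flops_gru seq_len input_dim hidden_dim num_layers output_dim bidirectional include_elementwise)

-- ===== LEMMAS AND PROOFS =====

-- After the first iteration the loop state's second component is the constant hidden_dim*dirs,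
-- so folding over any further list of length n just adds n copies of a fixed per-layer cost.
theorem pv_loop_const (seq_len hidden_dim dirs : Int) (include_elementwise : Bool)
    (l : List Int) (t : Int) :
    l.foldl
      (fun (s : Int × Int) _layer =>
        let flops_per_step_per_dir := 2 * 3 * (s.2 * hidden_dim + hidden_dim * hidden_dim)
        let flops_per_step_per_dir :=
          if include_elementwise then flops_per_step_per_dir + 10 * hidden_dim
          else flops_per_step_per_dir
        let layer_flops := seq_len * dirs * flops_per_step_per_dir
        (s.1 + layer_flops, hidden_dim * dirs))
      (t, hidden_dim * dirs)
    = (t + (l.length : Int) * (seq_len * dirs *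
        ((2 * 3 * ((hidden_dim * dirs) * hidden_dim + hidden_dim * hidden_dim)) +
          (if include_elementwise then 10 * hidden_dim else 0))), hidden_dim * dirs) := by
  induction l generalizing t with
  | nil => simp
  | cons x xs ih =>
    simp only [List.foldl_cons, ih]
    simp only [Prod.mk.injEq]
    refine ⟨?_, trivial⟩
    simp only [List.length_cons]
    push_cast
    split_ifs <;> ring

theorem estimate_flops_gru_eq (seq_len input_dim hidden_dim num_layers output_dim : Int)
    (bidirectional include_elementwise : Bool) :
    estimate_flops_gru seq_len input_dim hidden_dim num_layers output_dim bidirectional include_elementwise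
    = estimate_flops_gru_alt seq_len input_dim hidden_dim num_layers output_dim bidirectional include_elementwise := by
  unfold estimate_flops_gru estimate_flops_gru_alt
  by_cases h1 : num_layers ≥ 1
  · rw [PySem.List.pyRange_one_cons (by omega : (0:Int) < num_layers)]
    simp only [List.foldl_cons]
    rw [pv_loop_const]
    have hlen : ((PySem.List.pyRange (0 + 1) num_layers 1).length : Int) = num_layers - 1 := by
      rw [PySem.List.length_pyRange_one]; omega
    rw [hlen, if_pos h1]
    split_ifs <;> ring
  · rw [PySem.List.pyRange_one_eq_nil (by omega : num_layers ≤ 0)]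
    simp [h1]

-- ===== VERDICT (by name: the statement is the Claim_ definition above) =====
theorem estimate_flops_gru_spec : Claim_equal_estimate_flops_gru := by
  intro seq_len input_dim hidden_dim num_layers output_dim bidirectional include_elementwise _
  exact estimate_flops_gru_eq seq_len input_dim hidden_dim num_layers output_dim bidirectional include_elementwise
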